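-- pv_equiv track=rewrite | github.com/DaltonCole/ProgramingProblems | facebook_hacker_cup/2021/qual/a2/solution.py | common_letters
-- ===== SOURCE A (Python) =====
-- from typing import Dict, List, Tuple, Set
--
-- def common_letters(table, letters) -> Set[str]:
--     common = []
--     for letter in letters:
--         tmp = set()
--         for key, value in table[letter].items():
--             if value != -1:
--                 tmp.add(key)
--         common.append(tmp)
--     return set.intersection(*common)
-- ===== SOURCE B (Python) =====
-- def common_letters(table, letters):
--     candidates = {key for key, value in table[letters[0]].items() if value != -1}
--     for letter in letters[1:]:
--         d = table[letter]
--         candidates = {key for key in candidates if d.get(key, -1) != -1}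
--     return candidates
-- ===== Notes on version B (the rewrite author's own statement) =====
-- stated objective: alternative
-- what changed: Instead of building one qualifying-key set per letter and intersecting them all at the end, B seeds a candidate set from the first letter only and shrinks it in one pass over the remaining letters via per-dict lookups.
import Mathlib
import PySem

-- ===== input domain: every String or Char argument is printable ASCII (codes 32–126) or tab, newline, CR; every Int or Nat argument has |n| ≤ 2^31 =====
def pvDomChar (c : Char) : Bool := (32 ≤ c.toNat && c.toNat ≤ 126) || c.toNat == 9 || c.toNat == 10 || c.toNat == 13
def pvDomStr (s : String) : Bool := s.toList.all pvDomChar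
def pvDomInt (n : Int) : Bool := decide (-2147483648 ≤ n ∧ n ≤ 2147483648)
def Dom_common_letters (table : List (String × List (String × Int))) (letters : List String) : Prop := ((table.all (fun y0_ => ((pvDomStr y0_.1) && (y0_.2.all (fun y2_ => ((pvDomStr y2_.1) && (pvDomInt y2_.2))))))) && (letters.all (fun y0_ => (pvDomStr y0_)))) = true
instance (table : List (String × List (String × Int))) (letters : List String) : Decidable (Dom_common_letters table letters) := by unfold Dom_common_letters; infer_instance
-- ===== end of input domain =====

-- B keeps one shrinking candidate set (seeded from the first letter, filtered by lookups in the
-- remaining letters' dicts) instead of A's one-set-per-letter list intersected at the end.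

-- ===== PORT A =====
def common_letters (table : List (String × List (String × Int))) (letters : List String) : List String :=
  let tbl : PySem.Dict String (List (String × Int)) := PySem.Dict.ofList table
  -- common = []; for letter in letters: tmp = {key | table[letter][key] != -1}; common.append(tmp)
  let common : List (PySem.Set String) := letters.foldl (fun acc letter =>
    let d : PySem.Dict String Int := PySem.Dict.ofList ((tbl.get? letter).getD [])
    let tmp : PySem.Set String := d.items.foldl
      (fun s kv => if kv.2 ≠ -1 then PySem.Set.add s kv.1 else s) PySem.Set.empty
    acc ++ [tmp]) []
  -- set.intersection(*common); with letters = [] Python raises TypeError (outside Pre_)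
  match common with
  | [] => []
  | s :: rest => rest.foldl PySem.Set.inter s

-- ===== PORT B =====
def common_letters_alt (table : List (String × List (String × Int))) (letters : List String) : List String :=
  match letters with
  | [] => []  -- Python B raises IndexError on letters[0] here (outside Pre_)
  | l0 :: rest =>
    let tbl : PySem.Dict String (List (String × Int)) := PySem.Dict.ofList table
    let d0 : PySem.Dict String Int := PySem.Dict.ofList ((tbl.get? l0).getD [])
    -- candidates = {key for key, value in table[letters[0]].items() if value != -1}
    let candidates : PySem.Set String :=
      PySem.Set.ofList ((d0.items.filter (fun kv => kv.2 ≠ -1)).map (·.1))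
    -- for letter in letters[1:]: candidates = {k for k in candidates if table[letter].get(k, -1) != -1}
    rest.foldl (fun cand letter =>
      let d : PySem.Dict String Int := PySem.Dict.ofList ((tbl.get? letter).getD [])
      cand.filter (fun k => d.getD k (-1) ≠ -1)) candidates

-- ===== PRECONDITION & SPEC =====
-- Pre_ excludes exactly the inputs where the Python A raises: empty letters (TypeError from
-- set.intersection with no arguments) and a letter missing from table (KeyError).
def Pre_common_letters (table : List (String × List (String × Int))) (letters : List String) : Prop :=
  letters ≠ [] ∧ ∀ l ∈ letters, l ∈ table.map Prod.fst
instance (table : List (String × List (String × Int))) (letters : List String) : Decidable (Pre_common_letters table letters) := by unfold Pre_common_letters; infer_instance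

def pvWitness_common_letters : (List (String × List (String × Int))) × List String :=
  ([("a", [("x", 1), ("y", -1)]), ("b", [("x", 2)])], ["a", "b"])

def Spec_common_letters (table : List (String × List (String × Int))) (letters : List String) (out : List String) : Prop := out = common_letters_alt table letters
instance (table : List (String × List (String × Int))) (letters : List String) (out : List String) : Decidable (Spec_common_letters table letters out) := by unfold Spec_common_letters; infer_instance

-- ===== CLAIM (what is proved, stated in full; the proofs are below) =====
def Claim_equal_common_letters : Prop := ∀ (table : List (String × List (String × Int))) (letters : List String), Dom_common_letters table letters → Pre_common_letters table letters → Spec_common_letters table letters (common_letters table letters)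

-- ===== LEMMAS AND PROOFS =====

-- the per-letter dict both ports build
def pvDictOf (table : List (String × List (String × Int))) (l : String) : PySem.Dict String Int :=
  PySem.Dict.ofList (((PySem.Dict.ofList table).get? l).getD [])

-- the qualifying keys of one letter, in dict order
def pvQual (table : List (String × List (String × Int))) (l : String) : List String :=
  ((pvDictOf table l).items.filter (fun kv => kv.2 ≠ -1)).map (·.1)

-- A's inner loop over a nodup-keyed item list appends exactly the qualifying keys
lemma foldl_add_if_eq (l : List (String × Int)) (s : PySem.Set String)
    (hnd : (l.map Prod.fst).Nodup) (hdis : ∀ kv ∈ l, kv.1 ∉ s) :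
    l.foldl (fun s kv => if kv.2 ≠ -1 then PySem.Set.add s kv.1 else s) s
      = s ++ (l.filter (fun kv => kv.2 ≠ -1)).map (·.1) := by
  induction l generalizing s with
  | nil => simp
  | cons kv t ih =>
    obtain ⟨k, v⟩ := kv
    simp only [List.map_cons, List.nodup_cons] at hnd
    by_cases hv : v ≠ -1
    · have hks : k ∉ s := hdis (k, v) (by simp)
      have hadd : PySem.Set.add s k = s ++ [k] := PySem.Set.add_of_not_mem hks
      simp only [List.foldl_cons, if_pos hv, hadd]
      rw [ih (s ++ [k]) hnd.2]
      · simp [hv]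
      · intro kv' hm
        simp only [List.mem_append, List.mem_singleton]
        rintro (h | h)
        · exact hdis kv' (by simp [hm]) h
        · exact hnd.1 (h ▸ List.mem_map_of_mem hm)
    · simp only [List.foldl_cons, if_neg hv]
      rw [ih s hnd.2 (fun kv' hm => hdis kv' (by simp [hm]))]
      simp [hv]

-- membership among the qualifying keys is exactly B's `.get(k, -1) != -1` test
lemma mem_qual_iff (d : PySem.Dict String Int) (hnd : d.keys.Nodup) (k : String) :
    k ∈ (d.items.filter (fun kv => kv.2 ≠ -1)).map (·.1) ↔ d.getD k (-1) ≠ -1 := by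
  constructor
  · intro h
    simp only [List.mem_map, List.mem_filter] at h
    obtain ⟨⟨k', v⟩, ⟨hm, hv⟩, rfl⟩ := h
    have := PySem.Dict.get?_of_mem_items d hm hnd
    rw [PySem.Dict.getD_eq_get?_getD, this]
    simpa using hv
  · intro h
    rw [PySem.Dict.getD_eq_get?_getD] at h
    cases hg : d.get? k with
    | none => rw [hg] at h; simp at h
    | some v =>
      rw [hg] at h
      simp only [Option.getD_some] at h
      have hm := PySem.Dict.mem_items_of_get?_eq_some d hg
      exact List.mem_map.mpr ⟨(k, v), List.mem_filter.mpr ⟨hm, by simpa using h⟩, rfl⟩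

lemma qual_nodup (d : PySem.Dict String Int) (hnd : d.keys.Nodup) :
    ((d.items.filter (fun kv => kv.2 ≠ -1)).map (·.1)).Nodup := by
  have h1 : (d.items.filter (fun kv => kv.2 ≠ -1)).map (·.1) |>.Sublist (d.items.map (·.1)) :=
    List.Sublist.map _ List.filter_sublist
  have h2 : (d.items.map (·.1)).Nodup := hnd
  exact h2.sublist h1

-- intersecting with one letter's qualifying set is B's filter step
lemma inter_qual (table : List (String × List (String × Int))) (l : String)
    (acc : List String) :
    PySem.Set.inter acc (pvQual table l)
      = acc.filter (fun k => (pvDictOf table l).getD k (-1) ≠ -1) := by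
  unfold PySem.Set.inter
  apply List.filter_congr
  intro k _
  have hnd : (pvDictOf table l).keys.Nodup := by
    unfold pvDictOf; exact PySem.Dict.nodup_keys_ofList _
  by_cases h : (pvDictOf table l).getD k (-1) = -1
  · have hk : k ∉ pvQual table l := fun hm => ((mem_qual_iff (pvDictOf table l) hnd k).1 hm) h
    simp [PySem.Set.contains, h, hk]
  · have hk : k ∈ pvQual table l := (mem_qual_iff (pvDictOf table l) hnd k).2 h
    simp [PySem.Set.contains, h, hk]

-- A's tmp for one letter is the qualifying-key list
lemma tmp_eq (table : List (String × List (String × Int))) (l : String) :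
    (PySem.Dict.ofList (((PySem.Dict.ofList table).get? l).getD [])).items.foldl
      (fun s kv => if kv.2 ≠ -1 then PySem.Set.add s kv.1 else s) PySem.Set.empty
      = pvQual table l := by
  have hnd : ((pvDictOf table l).items.map Prod.fst).Nodup := by
    unfold pvDictOf; exact PySem.Dict.nodup_keys_ofList _
  have h := foldl_add_if_eq (pvDictOf table l).items [] hnd (by simp)
  simpa [pvQual, pvDictOf, PySem.Set.empty] using h

-- B's seed candidate set is the first letter's qualifying-key list
lemma cand_eq (table : List (String × List (String × Int))) (l : String) :
    PySem.Set.ofList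
      (((PySem.Dict.ofList (((PySem.Dict.ofList table).get? l).getD [])).items.filter
        (fun kv => kv.2 ≠ -1)).map (·.1)) = pvQual table l := by
  have hnd : (pvDictOf table l).keys.Nodup := by
    unfold pvDictOf; exact PySem.Dict.nodup_keys_ofList _
  have h := PySem.Set.ofList_eq_self_of_nodup _ (qual_nodup (pvDictOf table l) hnd)
  simpa [pvQual, pvDictOf] using h

lemma pv_main (table : List (String × List (String × Int))) (letters : List String)
    (hne : letters ≠ []) :
    common_letters table letters = common_letters_alt table letters := by
  cases letters with
  | nil => exact absurd rfl hne
  | cons l0 rest =>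
    simp only [common_letters, common_letters_alt]
    rw [PySem.List.foldl_append_singleton_eq_map]
    simp only [List.nil_append, List.map_cons]
    rw [List.foldl_map, tmp_eq, cand_eq]
    exact PySem.List.foldl_congr_mem rest _ _ (pvQual table l0)
      (fun acc x _ => by rw [tmp_eq]; exact inter_qual table x acc)

-- ===== VERDICT (by name: the statement is the Claim_ definition above) =====
theorem common_letters_spec : Claim_equal_common_letters := by
  intro table letters _hdom hpre
  unfold Spec_common_letters
  exact pv_main table letters hpre.1
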